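-- pv_equiv track=rewrite | github.com/LevLevel/homework4 | homeworks/hw8.py | ascending_sequence
-- ===== SOURCE A (Python) =====
-- def ascending_sequence(arr):
--     def is_increasing(seq):
--         for i in range(len(seq) - 1):
--             if seq[i] >= seq[i + 1]:
--                 return False
--         return True
--
--     if is_increasing(arr):
--         return True
--
--     for i in range(len(arr)):
--         temp = arr[:i] + arr[i + 1:]
--         if is_increasing(temp):
--             return True
--
--     return False
-- ===== SOURCE B (Python) =====
-- def ascending_sequence(arr):
--     # Single pass: at the first adjacent violation, only removing one of its two
--     # elements can help; check those two candidates and stop.  O(n) vs A's O(n^2).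
--     def incr(seq):
--         return all(x < y for x, y in zip(seq, seq[1:]))
--
--     for k in range(len(arr) - 1):
--         if arr[k] >= arr[k + 1]:
--             return incr(arr[:k] + arr[k + 1:]) or incr(arr[:k + 1] + arr[k + 2:])
--     return True
-- ===== Notes on version B (the rewrite author's own statement) =====
-- stated objective: faster
-- what changed: Instead of trying to delete every index and rescanning the whole list each time, B scans once for the first adjacent violation and only tests the two deletions (left or right element of that pair) that could possibly fix it.
import Mathlib
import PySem

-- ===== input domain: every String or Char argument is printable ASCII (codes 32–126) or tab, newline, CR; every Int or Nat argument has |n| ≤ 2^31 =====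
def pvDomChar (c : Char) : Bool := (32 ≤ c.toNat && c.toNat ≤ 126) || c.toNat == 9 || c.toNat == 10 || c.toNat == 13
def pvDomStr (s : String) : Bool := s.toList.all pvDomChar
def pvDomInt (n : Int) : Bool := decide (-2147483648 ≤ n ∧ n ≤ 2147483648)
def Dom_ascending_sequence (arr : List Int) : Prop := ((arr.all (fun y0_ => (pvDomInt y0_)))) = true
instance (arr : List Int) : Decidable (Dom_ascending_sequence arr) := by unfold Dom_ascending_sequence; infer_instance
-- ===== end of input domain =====

-- B replaces A's try-every-deletion O(n^2) scan by a single pass that tests only the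
-- two deletions at the first adjacent violation (asymptotically faster).

-- ===== PORT A =====
-- inner helper is_increasing: loop over range(len(seq)-1) with early False ≡ `all`
-- (indices produced by pyRange are always in range, so pyGetD's default is never used)
def pvIsIncreasing (seq : List Int) : Bool :=
  (PySem.List.pyRange 0 ((seq.length : Int) - 1) 1).all
    (fun i => !(decide (PySem.List.pyGetD seq i 0 ≥ PySem.List.pyGetD seq (i + 1) 0)))

def ascending_sequence (arr : List Int) : Bool :=
  if pvIsIncreasing arr then true
  else
    -- for i in range(len(arr)): temp = arr[:i] + arr[i+1:]; early True ≡ `any`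
    (PySem.List.pyRange 0 (arr.length : Int) 1).any
      (fun i => pvIsIncreasing
        (PySem.List.slice arr none (some i) ++ PySem.List.slice arr (some (i + 1)) none))

-- ===== PORT B =====
-- incr(seq): all(x < y for x, y in zip(seq, seq[1:]))
def pvIncr : List Int → Bool
  | a :: b :: t => decide (a < b) && pvIncr (b :: t)
  | _ => true

-- the single pass of Source B: pre = arr[:k] already scanned (strictly increasing so far),
-- remaining list a :: b :: t; at the first violation test the two candidate deletions
def pvScan : List Int → List Int → Bool
  | pre, a :: b :: t =>
      if a ≥ b then pvIncr (pre ++ b :: t) || pvIncr (pre ++ a :: t)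
      else pvScan (pre ++ [a]) (b :: t)
  | _, _ => true

def ascending_sequence_alt (arr : List Int) : Bool := pvScan [] arr

-- ===== PRECONDITION & SPEC =====
def Spec_ascending_sequence (arr : List Int) (out : Bool) : Prop := out = ascending_sequence_alt arr
instance (arr : List Int) (out : Bool) : Decidable (Spec_ascending_sequence arr out) := by unfold Spec_ascending_sequence; infer_instance

-- ===== CLAIM (what is proved, stated in full; the proofs are below) =====
def Claim_equal_ascending_sequence : Prop := ∀ (arr : List Int), Dom_ascending_sequence arr → Spec_ascending_sequence arr (ascending_sequence arr)

-- ===== LEMMAS AND PROOFS =====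

-- the common semantic target: arr itself, or arr minus one element, strictly increasing
def pvRemovable (l : List Int) : Prop :=
  List.IsChain (· < ·) l ∨ ∃ i < l.length, List.IsChain (· < ·) (l.eraseIdx i)

theorem pvIncr_iff : ∀ l : List Int, pvIncr l = true ↔ List.IsChain (· < ·) l
  | [] => by simp [pvIncr]
  | [a] => by simp [pvIncr]
  | a :: b :: t => by
      rw [show pvIncr (a :: b :: t) = (decide (a < b) && pvIncr (b :: t)) from rfl,
        List.isChain_cons_cons]
      simp [pvIncr_iff (b :: t)]

theorem pvIsIncreasing_iff (s : List Int) :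
    pvIsIncreasing s = true ↔ List.IsChain (· < ·) s := by
  rw [List.isChain_iff_getElem]
  unfold pvIsIncreasing
  rw [PySem.List.pyRange_one]
  simp only [List.all_map, List.all_eq_true, List.mem_range, Function.comp,
    Bool.not_eq_true', decide_eq_false_iff_not, not_le, zero_add]
  constructor
  · intro h i hi
    have hk : i < ((s.length : Int) - 1 - 0).toNat := by omega
    have := h i hk
    rw [show ((i : Int) + 1) = ((i + 1 : Nat) : Int) by push_cast; ring] at this
    rw [PySem.List.pyGetD_natCast, PySem.List.pyGetD_natCast] at this
    rwa [List.getD_eq_getElem _ _ (by omega), List.getD_eq_getElem _ _ hi] at this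
  · intro h k hk
    have hk' : k + 1 < s.length := by omega
    rw [show ((k : Int) + 1) = ((k + 1 : Nat) : Int) by push_cast; ring]
    rw [PySem.List.pyGetD_natCast, PySem.List.pyGetD_natCast]
    rw [List.getD_eq_getElem _ _ (by omega), List.getD_eq_getElem _ _ hk']
    exact h k hk'

theorem ascending_sequence_iff (arr : List Int) :
    ascending_sequence arr = true ↔ pvRemovable arr := by
  unfold ascending_sequence
  by_cases hinc : pvIsIncreasing arr = true
  · simp only [hinc, if_true, true_iff]
    exact Or.inl ((pvIsIncreasing_iff arr).1 hinc)
  · simp only [hinc, if_false, Bool.false_eq_true]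
    rw [PySem.List.pyRange_one]
    simp only [List.any_map, List.any_eq_true, List.mem_range, Function.comp, zero_add]
    constructor
    · rintro ⟨k, hk, hket⟩
      have hk' : k < arr.length := by omega
      rw [show ((k : Int) + 1) = ((k + 1 : Nat) : Int) by push_cast; ring] at hket
      rw [PySem.List.slice_to_natCast, PySem.List.slice_from_natCast,
        ← List.eraseIdx_eq_take_drop_succ, pvIsIncreasing_iff] at hket
      exact Or.inr ⟨k, hk', hket⟩
    · rintro (h | ⟨k, hk, hket⟩)
      · exact absurd ((pvIsIncreasing_iff arr).2 h) hinc
      · refine ⟨k, by omega, ?_⟩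
        rw [show ((k : Int) + 1) = ((k + 1 : Nat) : Int) by push_cast; ring]
        rw [PySem.List.slice_to_natCast, PySem.List.slice_from_natCast,
          ← List.eraseIdx_eq_take_drop_succ, pvIsIncreasing_iff]
        exact hket

theorem pvScan_iff (rest : List Int) : ∀ pre : List Int,
    List.IsChain (· < ·) (pre ++ rest.take 1) →
    (pvScan pre rest = true ↔ pvRemovable (pre ++ rest)) := by
  induction rest with
  | nil =>
      intro pre h
      simp only [List.take_nil, List.append_nil] at h
      simp [pvScan, pvRemovable, h]
  | cons a rest' ih =>
      cases rest' with
      | nil =>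
          intro pre h
          simp only [List.take_succ_cons, List.take_zero] at h
          simp [pvScan, pvRemovable, h]
      | cons b t =>
          intro pre h
          simp only [List.take_succ_cons, List.take_zero] at h
          by_cases hab : a ≥ b
          · simp only [pvScan, hab, if_true, Bool.or_eq_true, pvIncr_iff]
            constructor
            · rintro (hL | hR)
              · refine Or.inr ⟨pre.length, by simp, ?_⟩
                rw [List.eraseIdx_append_of_length_le (le_refl _)]
                simpa using hL
              · refine Or.inr ⟨pre.length + 1, by simp, ?_⟩
                rw [List.eraseIdx_append_of_length_le (by omega)]
                have : (pre.length + 1) - pre.length = 1 := by omega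
                rw [this]
                simpa [List.eraseIdx] using hR
            · rintro (hc | ⟨i, hi, hc⟩)
              · exact absurd (List.isChain_append_cons_cons.1 hc).2.1 (by omega)
              · rcases lt_trichotomy i pre.length with hlt | heq | hgt
                · rw [List.eraseIdx_append_of_lt_length hlt] at hc
                  exact absurd (List.isChain_append_cons_cons.1 hc).2.1 (by omega)
                · subst heq
                  rw [List.eraseIdx_append_of_length_le (le_refl _)] at hc
                  exact Or.inl (by simpa using hc)
                · rcases Nat.eq_or_lt_of_le hgt with heq1 | hgt1
                  · rw [List.eraseIdx_append_of_length_le (by omega), ← heq1] at hc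
                    have h1 : pre.length + 1 - pre.length = 1 := by omega
                    rw [h1] at hc
                    exact Or.inr (by simpa [List.eraseIdx] using hc)
                  · rw [List.eraseIdx_append_of_length_le (by omega)] at hc
                    obtain ⟨m, hm⟩ : ∃ m, i - pre.length = m + 2 := ⟨i - pre.length - 2, by omega⟩
                    rw [hm] at hc
                    simp only [List.eraseIdx] at hc
                    exact absurd (List.isChain_append_cons_cons.1 hc).2.1 (by omega)
          · have hab' : a < b := by omega
            simp only [pvScan, hab, if_false]
            have h' : List.IsChain (· < ·) ((pre ++ [a]) ++ (b :: t).take 1) := by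
              simp only [List.take_succ_cons, List.take_zero]
              refine List.isChain_append.2 ⟨h, List.isChain_singleton _, ?_⟩
              simp [hab']
            rw [ih (pre ++ [a]) h']
            simp

theorem ascending_sequence_alt_iff (arr : List Int) :
    ascending_sequence_alt arr = true ↔ pvRemovable arr := by
  have h : List.IsChain (· < ·) (([] : List Int) ++ arr.take 1) := by
    cases arr <;> simp
  simpa using pvScan_iff arr [] h

-- ===== VERDICT (by name: the statement is the Claim_ definition above) =====
theorem ascending_sequence_spec : Claim_equal_ascending_sequence := by
  intro arr _
  unfold Spec_ascending_sequence
  rw [Bool.eq_iff_iff, ascending_sequence_iff, ascending_sequence_alt_iff]
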